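-- pv_equiv track=rewrite | github.com/cirosantilli/project-euler-solvers | solvers/463.py | f_value
-- ===== SOURCE A (Python) =====
-- MOD = 1_000_000_000  # last 9 digits
--
-- def f_value(n):
--     """Compute f(n) mod MOD (n>=1)."""
--     if n == 1:
--         return 1
--     a, b = 1, 3  # v(1)
--     for ch in bin(n)[3:]:
--         if ch == "0":
--             a, b = a, (-a + 2 * b) % MOD
--         else:
--             a, b = b, (-2 * a + 3 * b) % MOD
--     return a % MOD
-- ===== SOURCE B (Python) =====
-- MOD = 1_000_000_000  # last 9 digits
--
--
-- def f_value(n):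
--     """Compute f(n) mod MOD (n>=1) top-down from the PE463 recurrence:
--     f(1)=f(2)=1, f(3)=3, f(2m)=f(m), f(4m+1)=2f(2m+1)-f(m), f(4m+3)=3f(2m+1)-2f(m)."""
--     memo = {}
--
--     def f(k):
--         if k == 1 or k == 2:
--             return 1
--         if k == 3:
--             return 3
--         r = memo.get(k)
--         if r is not None:
--             return r
--         if k % 2 == 0:
--             r = f(k // 2)
--         else:
--             m = k // 4
--             if k % 4 == 1:
--                 r = (2 * f(2 * m + 1) - f(m)) % MOD
--             else:
--                 r = (3 * f(2 * m + 1) - 2 * f(m)) % MOD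
--         memo[k] = r
--         return r
--
--     return f(n)
-- ===== Notes on version B (the rewrite author's own statement) =====
-- stated objective: alternative
-- what changed: B computes f top-down by memoized recursion on the PE463 recurrence (branching on n mod 2 / n mod 4), instead of A's left-to-right scan over the binary expansion maintaining a linear-state pair.
-- outside the precondition, e.g. on f_value(0): A returns 1, B raises RecursionError; on f_value(-5): A returns 11, B raises RecursionError
import Mathlib
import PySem

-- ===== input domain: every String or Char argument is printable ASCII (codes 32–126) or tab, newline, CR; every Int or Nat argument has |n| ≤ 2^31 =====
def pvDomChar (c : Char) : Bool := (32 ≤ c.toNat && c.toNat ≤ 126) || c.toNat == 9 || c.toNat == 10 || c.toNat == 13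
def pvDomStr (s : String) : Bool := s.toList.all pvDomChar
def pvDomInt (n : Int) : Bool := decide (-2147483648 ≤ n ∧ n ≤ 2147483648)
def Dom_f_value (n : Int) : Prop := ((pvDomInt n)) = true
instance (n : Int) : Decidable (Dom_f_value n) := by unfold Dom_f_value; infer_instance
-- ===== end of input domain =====

-- B replaces A's left-to-right binary-scan with top-down memoized recursion on the
-- PE463 recurrence; same values everywhere A's result is meaningful (n >= 1).

-- ===== PORT A =====
-- bin(n) for a natural number, as the list of binary digit characters, msb first
-- (structural recursion on a fuel counter; fuel n+1 always suffices since the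
-- argument strictly decreases).
def binBitsGo : Nat → Nat → List Char
  | 0, _ => []
  | fuel + 1, n =>
    if n ≤ 1 then [if n = 1 then '1' else '0']
    else binBitsGo fuel (n / 2) ++ [if n % 2 = 1 then '1' else '0']

def binBits (n : Nat) : List Char := binBitsGo (n + 1) n

def f_value (n : Int) : Int :=
  if n = 1 then 1
  else
    -- bin(n)[3:]: for n ≥ 0 that drops "0b" and the leading bit; for n < 0,
    -- bin(n) = "-0b…", so [3:] is ALL the bits of |n| (Python's accidental slicing).
    let L : List Char := if n < 0 then binBits n.natAbs else List.drop 1 (binBits n.toNat)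
    let p := L.foldl (fun (ab : Int × Int) ch =>
      if ch = '0' then (ab.1, PySem.Int.mod (-ab.1 + 2 * ab.2) 1000000000)
      else (ab.2, PySem.Int.mod (-2 * ab.1 + 3 * ab.2) 1000000000)) (1, 3)
    PySem.Int.mod p.1 1000000000

-- ===== PORT B =====
-- Transcription of Source B's inner recursion f.  Source B's memo dict is a pure cache and
-- never changes the returned value; it is elided here.  (Source B does not terminate for
-- k ≤ 0; those inputs are outside Pre_, so the k = 0 branch value is irrelevant.)
-- (structural recursion on a fuel counter; fuel k suffices since every recursive
-- argument is strictly smaller, so the 0-fuel row is never reached from fAux).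
def fAuxGo : Nat → Nat → Int
  | 0, _ => 1
  | fuel + 1, k =>
    if k = 1 ∨ k = 2 then 1
    else if k = 3 then 3
    else if k = 0 then 1
    else if k % 2 = 0 then fAuxGo fuel (k / 2)
    else if k % 4 = 1 then PySem.Int.mod (2 * fAuxGo fuel (2 * (k / 4) + 1) - fAuxGo fuel (k / 4)) 1000000000
    else PySem.Int.mod (3 * fAuxGo fuel (2 * (k / 4) + 1) - 2 * fAuxGo fuel (k / 4)) 1000000000

def fAux (k : Nat) : Int := fAuxGo k k

def f_value_alt (n : Int) : Int := fAux n.toNat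

-- ===== PRECONDITION & SPEC =====
-- Pre_ excludes n ≤ 0: there A's value comes from the accidental slice bin(n)[3:]
-- (e.g. f_value(-5) = f_value(13)) and B's natural recursion raises RecursionError.
def Pre_f_value (n : Int) : Prop := 1 ≤ n
instance (n : Int) : Decidable (Pre_f_value n) := by unfold Pre_f_value; infer_instance
def pvWitness_f_value : Int := 13

def Spec_f_value (n : Int) (out : Int) : Prop := out = f_value_alt n
instance (n : Int) (out : Int) : Decidable (Spec_f_value n out) := by unfold Spec_f_value; infer_instance

-- ===== CLAIM (what is proved, stated in full; the proofs are below) =====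
def Claim_equal_f_value : Prop := ∀ (n : Int), Dom_f_value n → Pre_f_value n → Spec_f_value n (f_value n)

-- ===== LEMMAS AND PROOFS =====

def pvStep (ab : Int × Int) (ch : Char) : Int × Int :=
  if ch = '0' then (ab.1, PySem.Int.mod (-ab.1 + 2 * ab.2) 1000000000)
  else (ab.2, PySem.Int.mod (-2 * ab.1 + 3 * ab.2) 1000000000)

theorem binBitsGo_fuel : ∀ (f1 f2 n : Nat), n < f1 → n < f2 →
    binBitsGo f1 n = binBitsGo f2 n := by
  intro f1
  induction f1 with
  | zero => intro f2 n h1 h2; omega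
  | succ f ih =>
    intro f2 n h1 h2
    cases f2 with
    | zero => omega
    | succ f2' =>
      simp only [binBitsGo]
      by_cases hA : n ≤ 1
      · rw [if_pos hA, if_pos hA]
      · rw [if_neg hA, if_neg hA, ih f2' (n / 2) (by omega) (by omega)]

theorem binBits_eq (n : Nat) (h : 2 ≤ n) :
    binBits n = binBits (n / 2) ++ [if n % 2 = 1 then '1' else '0'] := by
  conv_lhs => rw [binBits]
  simp only [binBitsGo]
  rw [if_neg (by omega : ¬ n ≤ 1),
    binBitsGo_fuel n (n / 2 + 1) (n / 2) (by omega) (by omega)]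
  rfl

theorem binBits_ne_nil (n : Nat) : binBits n ≠ [] := by
  unfold binBits binBitsGo
  split <;> simp

theorem fAuxGo_fuel : ∀ (f1 f2 k : Nat), k ≤ f1 → k ≤ f2 →
    fAuxGo f1 k = fAuxGo f2 k := by
  intro f1
  induction f1 with
  | zero =>
    intro f2 k h1 h2
    have hk : k = 0 := by omega
    subst hk
    cases f2 with
    | zero => rfl
    | succ f2' => simp [fAuxGo]
  | succ f ih =>
    intro f2 k h1 h2
    cases f2 with
    | zero =>
      have hk : k = 0 := by omega
      subst hk
      simp [fAuxGo]
    | succ f2' =>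
      simp only [fAuxGo]
      split_ifs with hA hB hC hD hE
      · rfl
      · rfl
      · rfl
      · exact ih f2' (k / 2) (by omega) (by omega)
      · rw [ih f2' (2 * (k / 4) + 1) (by omega) (by omega), ih f2' (k / 4) (by omega) (by omega)]
      · rw [ih f2' (2 * (k / 4) + 1) (by omega) (by omega), ih f2' (k / 4) (by omega) (by omega)]

theorem fAux_eq (k : Nat) (hk : 4 ≤ k) :
    fAux k = if k % 2 = 0 then fAux (k / 2)
      else if k % 4 = 1 then PySem.Int.mod (2 * fAux (2 * (k / 4) + 1) - fAux (k / 4)) 1000000000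
      else PySem.Int.mod (3 * fAux (2 * (k / 4) + 1) - 2 * fAux (k / 4)) 1000000000 := by
  obtain ⟨f, rfl⟩ : ∃ f, k = f + 1 := ⟨k - 1, by omega⟩
  show fAuxGo (f + 1) (f + 1) = _
  simp only [fAuxGo]
  rw [if_neg (by omega : ¬ (f + 1 = 1 ∨ f + 1 = 2)), if_neg (by omega : ¬ f + 1 = 3),
    if_neg (by omega : ¬ f + 1 = 0),
    fAuxGo_fuel f ((f + 1) / 2) ((f + 1) / 2) (by omega) (by omega),
    fAuxGo_fuel f (2 * ((f + 1) / 4) + 1) (2 * ((f + 1) / 4) + 1) (by omega) (by omega),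
    fAuxGo_fuel f ((f + 1) / 4) ((f + 1) / 4) (by omega) (by omega)]
  rfl

theorem fAux_double (q : Nat) (hq : 1 ≤ q) : fAux (2 * q) = fAux q := by
  rcases Nat.lt_or_ge q 2 with h | h
  · interval_cases q; decide
  · rw [fAux_eq (2 * q) (by omega), if_pos (by omega : 2 * q % 2 = 0),
      show 2 * q / 2 = q from by omega]

theorem fAux_odd1 (q : Nat) (hq : 1 ≤ q) :
    fAux (4 * q + 1) = PySem.Int.mod (2 * fAux (2 * q + 1) - fAux q) 1000000000 := by
  rw [fAux_eq (4 * q + 1) (by omega), if_neg (by omega : ¬ (4 * q + 1) % 2 = 0),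
    if_pos (by omega : (4 * q + 1) % 4 = 1), show (4 * q + 1) / 4 = q from by omega]

theorem fAux_odd3 (q : Nat) (hq : 1 ≤ q) :
    fAux (4 * q + 3) = PySem.Int.mod (3 * fAux (2 * q + 1) - 2 * fAux q) 1000000000 := by
  rw [fAux_eq (4 * q + 3) (by omega), if_neg (by omega : ¬ (4 * q + 3) % 2 = 0),
    if_neg (by omega : ¬ (4 * q + 3) % 4 = 1), show (4 * q + 3) / 4 = q from by omega]

theorem stepEven (q : Nat) (hq : 1 ≤ q) :
    List.foldl pvStep (fAux q, fAux (2 * q + 1)) ['0'] = (fAux (2 * q), fAux (2 * (2 * q) + 1)) := by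
  have h1 : 2 * (2 * q) + 1 = 4 * q + 1 := by ring
  rw [h1, fAux_odd1 q hq, fAux_double q hq,
    show (2 * fAux (2 * q + 1) - fAux q) = (-fAux q + 2 * fAux (2 * q + 1)) from by ring]
  rfl

theorem stepOdd (q : Nat) (hq : 1 ≤ q) :
    List.foldl pvStep (fAux q, fAux (2 * q + 1)) ['1'] = (fAux (2 * q + 1), fAux (2 * (2 * q + 1) + 1)) := by
  have h1 : 2 * (2 * q + 1) + 1 = 4 * q + 3 := by ring
  rw [h1, fAux_odd3 q hq,
    show (3 * fAux (2 * q + 1) - 2 * fAux q) = (-2 * fAux q + 3 * fAux (2 * q + 1)) from by ring]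
  rfl

-- invariant: folding A's step over the bits of n after the leading one, starting
-- from (1, 3) = (f(1), f(3)), yields exactly (fAux n, fAux (2n+1)).
theorem pv_invariant : ∀ n : Nat, 1 ≤ n →
    (List.drop 1 (binBits n)).foldl pvStep (1, 3) = (fAux n, fAux (2 * n + 1)) := by
  intro n
  induction n using Nat.strong_induction_on with
  | _ n ih =>
    intro hn
    rcases Nat.lt_or_ge n 2 with h | h
    · have : n = 1 := by omega
      subst this; decide
    · have hq : 1 ≤ n / 2 := by omega
      rw [binBits_eq n (by omega)]
      rw [List.drop_append_of_le_length
            (by have := binBits_ne_nil (n / 2)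
                cases hb : binBits (n / 2) with
                | nil => exact absurd hb this
                | cons x xs => simp),
          List.foldl_append, ih (n / 2) (by omega) hq]
      set q := n / 2 with hqdef
      rcases Nat.even_or_odd n with ⟨t, ht⟩ | ⟨t, ht⟩
      · -- n = 2q, bit '0'
        have h2q : n = 2 * q := by omega
        have hc : (if n % 2 = 1 then '1' else '0') = '0' := by
          rw [if_neg]; omega
        rw [hc, h2q]
        exact stepEven q hq
      · -- n = 2q+1, bit '1'
        have h2q : n = 2 * q + 1 := by omega
        have hc : (if n % 2 = 1 then '1' else '0') = '1' := by
          rw [if_pos]; omega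
        rw [hc, h2q]
        exact stepOdd q hq

theorem fAuxGo_bounds : ∀ f k : Nat, 0 ≤ fAuxGo f k ∧ fAuxGo f k < 1000000000 := by
  intro f
  induction f with
  | zero => intro k; simp [fAuxGo]
  | succ f ih =>
    intro k
    have hM : (0:Int) < 1000000000 := by norm_num
    simp only [fAuxGo]
    split_ifs
    · omega
    · omega
    · omega
    · exact ih (k / 2)
    · exact ⟨PySem.Int.mod_nonneg _ hM, PySem.Int.mod_lt _ hM⟩
    · exact ⟨PySem.Int.mod_nonneg _ hM, PySem.Int.mod_lt _ hM⟩

theorem fAux_bounds (k : Nat) : 0 ≤ fAux k ∧ fAux k < 1000000000 := fAuxGo_bounds k k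

-- ===== VERDICT (by name: the statement is the Claim_ definition above) =====
theorem f_value_spec : Claim_equal_f_value := by
  intro n _ hpre
  unfold Spec_f_value f_value f_value_alt
  by_cases h1 : n = 1
  · subst h1; decide
  · have hpos : 1 ≤ n := hpre
    have hnlt : ¬ n < 0 := by omega
    have hnat : 1 ≤ n.toNat := by omega
    simp only [if_neg h1, if_neg hnlt]
    have hinv := pv_invariant n.toNat hnat
    unfold pvStep at hinv
    rw [hinv]
    have hb := fAux_bounds n.toNat
    rw [PySem.Int.mod_eq_emod_of_pos (by norm_num : (0:Int) < 1000000000)]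
    exact Int.emod_eq_of_lt hb.1 hb.2
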